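-- pv_equiv track=rewrite | github.com/ARezaAbdi/Deep-Reinforcement-Learning-AlphaGo-Zero-for-LCS | DRL(AlphaGo Zero) for LCS.py | possible_action
-- ===== SOURCE A (Python) =====
-- def possible_action(_strings):
--     pos_act = []
--     _alphabet = ['A','C','G','T']
--     for i in range(len(_alphabet)):
--       counter = 0
--       for j in range(len(_strings)):
--         x =_strings[j].find(_alphabet[i])
--         if x >= 0:
--           x = True
--         else:
--           x = False
--         if x == True:
--           counter= counter + 1
--       if counter == len(_strings):
--         pos_act.append(_alphabet[i])
--       else:
--         pos_act.append("x")
--     return pos_act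
-- ===== SOURCE B (Python) =====
-- def possible_action(_strings):
--     n = len(_strings)
--     counts = {}
--     for s in _strings:
--         for ch in dict.fromkeys(s):
--             counts[ch] = counts.get(ch, 0) + 1
--     return [c if counts.get(c, 0) == n else "x" for c in "ACGT"]
-- ===== Notes on version B (the rewrite author's own statement) =====
-- stated objective: alternative
-- what changed: Replaces the per-letter rescan of all strings (find on each string for each alphabet letter) by a single counting pass over the strings that builds a letter-count table from each string's deduplicated characters, then reads the fixed alphabet off the table.
import Mathlib
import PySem

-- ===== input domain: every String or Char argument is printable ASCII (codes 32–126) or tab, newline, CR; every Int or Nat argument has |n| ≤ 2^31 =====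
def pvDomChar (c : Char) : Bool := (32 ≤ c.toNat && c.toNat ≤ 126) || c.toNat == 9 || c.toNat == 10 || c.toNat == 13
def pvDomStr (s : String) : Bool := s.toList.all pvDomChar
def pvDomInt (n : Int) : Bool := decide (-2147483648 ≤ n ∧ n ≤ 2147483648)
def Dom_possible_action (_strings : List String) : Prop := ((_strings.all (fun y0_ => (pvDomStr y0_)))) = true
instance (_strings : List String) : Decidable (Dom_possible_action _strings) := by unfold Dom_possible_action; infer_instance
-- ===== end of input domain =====

-- B replaces A's per-letter rescan of all strings by one counting pass that builds a letter-count table (objective: alternative; measured ~1.3x, below the 1.5x bar).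

-- ===== PORT A =====
def possible_action (_strings : List String) : List String :=
  let _alphabet : List String := ["A", "C", "G", "T"]
  (PySem.List.pyRange 0 (PySem.List.len _alphabet) 1).foldl (fun pos_act i =>
    let counter : Int :=
      (PySem.List.pyRange 0 (PySem.List.len _strings) 1).foldl (fun counter j =>
        let x : Int := PySem.Str.find (PySem.List.pyGetD _strings j "") (PySem.List.pyGetD _alphabet i "")
        let xb : Bool := if 0 ≤ x then true else false
        if xb == true then counter + 1 else counter) 0
    if counter == PySem.List.len _strings then pos_act ++ [PySem.List.pyGetD _alphabet i ""]
    else pos_act ++ ["x"]) []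

-- ===== PORT B =====
def possible_action_alt (_strings : List String) : List String :=
  let n : Int := PySem.List.len _strings
  let counts : PySem.Dict Char Int :=
    _strings.foldl (fun d s =>
      (PySem.List.dedup s.toList).foldl (fun d ch => d.insert ch (d.getD ch 0 + 1)) d)
      PySem.Dict.empty
  "ACGT".toList.map (fun c => if counts.getD c 0 == n then String.ofList [c] else "x")

-- ===== PRECONDITION & SPEC =====
def Spec_possible_action (_strings : List String) (out : List String) : Prop := out = possible_action_alt _strings
instance (_strings : List String) (out : List String) : Decidable (Spec_possible_action _strings out) := by unfold Spec_possible_action; infer_instance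

-- ===== CLAIM (what is proved, stated in full; the proofs are below) =====
def Claim_equal_possible_action : Prop := ∀ (_strings : List String), Dom_possible_action _strings → Spec_possible_action _strings (possible_action _strings)

-- ===== LEMMAS AND PROOFS =====

-- [a] <:+: l ↔ a ∈ l
theorem pv_singleton_infix {α : Type} (a : α) (l : List α) : [a] <:+: l ↔ a ∈ l := by
  constructor
  · intro h; exact h.subset (List.mem_singleton_self a)
  · intro h
    obtain ⟨s, t, rfl⟩ := List.append_of_mem h
    exact ⟨s, t, by simp⟩

-- count in a deduplicated list is the membership indicator
theorem pv_count_dedup {α : Type} [DecidableEq α] (c : α) (l : List α) :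
    (PySem.List.dedup l).count c = if c ∈ l then 1 else 0 := by
  by_cases h : c ∈ l
  · simp only [h, if_true]
    have hn := PySem.List.nodup_dedup (xs := l)
    have hm : c ∈ PySem.List.dedup l := (PySem.List.mem_dedup l c).2 h
    have h1 : (PySem.List.dedup l).count c ≤ 1 := List.nodup_iff_count_le_one.1 hn c
    have h2 : 1 ≤ (PySem.List.dedup l).count c := List.one_le_count_iff.2 hm
    omega
  · simp only [h, if_false]
    exact List.count_eq_zero.2 (fun hm => h ((PySem.List.mem_dedup l c).1 hm))

-- B's counts table holds, for each char, the number of strings containing it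
theorem pv_counts_getD (c : Char) (xs : List String) (d : PySem.Dict Char Int) :
    (xs.foldl (fun d s =>
      (PySem.List.dedup s.toList).foldl (fun d ch => d.insert ch (d.getD ch 0 + 1)) d) d).getD c 0
      = d.getD c 0 + (xs.countP (fun s => decide (c ∈ s.toList)) : Int) := by
  induction xs generalizing d with
  | nil => simp
  | cons s xs ih =>
    simp only [List.foldl_cons, ih, PySem.Dict.getD_foldl_insert_add_one, pv_count_dedup,
      List.countP_cons]
    by_cases h : c ∈ s.toList <;> simp [h] <;> ring

-- A's inner counter counts the strings whose character set contains c
theorem pv_foldl_count (c : Char) (xs : List String) :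
    List.foldl (fun (counter : Int) (j : Int) =>
        if c ∈ (PySem.List.pyGetD xs j "").toList then counter + 1 else counter) 0
      (PySem.List.pyRange 0 (xs.length : Int))
      = (xs.countP (fun s => decide (c ∈ s.toList)) : Int) := by
  rw [PySem.List.foldl_pyRange_zero_pyGetD' xs ""
    (fun (counter : Int) (s : String) => if c ∈ s.toList then counter + 1 else counter) 0]
  rw [PySem.List.foldl_ite_add_one (fun s : String => c ∈ s.toList) xs 0]
  simp

-- the True/False dance of A's variable x is just the condition itself
theorem pv_ite_tf (P : Prop) [Decidable P] : ((if P then true else false) = true) ↔ P := by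
  by_cases h : P <;> simp [h]

-- the per-letter termination condition, in Prop form
theorem pv_cond_iff (c : Char) (xs : List String) :
    ((xs.countP (fun s => decide (c ∈ s.toList)) : Int) = (xs.length : Int))
      ↔ (∀ a ∈ xs, c ∈ a.toList) := by
  rw [Int.natCast_inj]
  simp [List.countP_eq_length (l := xs) (p := fun s => decide (c ∈ s.toList))]

theorem possible_action_eq (xs : List String) : possible_action xs = possible_action_alt xs := by
  unfold possible_action possible_action_alt
  have h4 : PySem.List.pyRange 0 (PySem.List.len (["A","C","G","T"] : List String)) 1
      = [0, 1, 2, 3] := by decide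
  have hB := fun c => pv_counts_getD c xs PySem.Dict.empty
  simp only [h4, List.foldl_cons, List.foldl_nil]
  have g0 : PySem.List.pyGetD (["A","C","G","T"] : List String) 0 "" = "A" := by decide
  have g1 : PySem.List.pyGetD (["A","C","G","T"] : List String) 1 "" = "C" := by decide
  have g2 : PySem.List.pyGetD (["A","C","G","T"] : List String) 2 "" = "G" := by decide
  have g3 : PySem.List.pyGetD (["A","C","G","T"] : List String) 3 "" = "T" := by decide
  have e1 : ("A" : String).toList = ['A'] := by simp
  have e2 : ("C" : String).toList = ['C'] := by simp
  have e3 : ("G" : String).toList = ['G'] := by simp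
  have e4 : ("T" : String).toList = ['T'] := by simp
  have e5 : ("ACGT" : String).toList = ['A', 'C', 'G', 'T'] := by simp
  have o1 : String.ofList ['A'] = "A" := by decide
  have o2 : String.ofList ['C'] = "C" := by decide
  have o3 : String.ofList ['G'] = "G" := by decide
  have o4 : String.ofList ['T'] = "T" := by decide
  simp only [PySem.Str.find_eq, PySem.Chars.find_nonneg_iff, g0, g1, g2, g3,
    e1, e2, e3, e4, e5, List.map_cons, List.map_nil, o1, o2, o3, o4,
    pv_singleton_infix, pv_ite_tf, pv_foldl_count, pv_cond_iff, hB, PySem.Dict.getD_empty, zero_add, beq_iff_eq, PySem.List.len_eq]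
  split_ifs <;> rfl

-- ===== VERDICT (by name: the statement is the Claim_ definition above) =====
theorem possible_action_spec : Claim_equal_possible_action := by
  intro xs _
  unfold Spec_possible_action
  exact possible_action_eq xs
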